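-- pv_equiv track=rewrite | github.com/JayFarei/wizengamot | backend/graph_feedback.py | _summarize_recommendations
-- ===== SOURCE A (Python) =====
-- from typing import Dict, Any, List, Optional, Tuple
--
-- def _summarize_recommendations(recommendations: List[Dict]) -> str:
--     """Summarize recommendations into a single message."""
--     high_priority = [r for r in recommendations if r["severity"] == "high"]
--     medium_priority = [r for r in recommendations if r["severity"] == "medium"]
--
--     if not recommendations:
--         return "No significant issues detected. Extraction quality is good."
--
--     parts = []
--     if high_priority:
--         parts.append(f"{len(high_priority)} high-priority issues need attention")
--     if medium_priority:
--         parts.append(f"{len(medium_priority)} medium-priority improvements suggested")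
--
--     return "; ".join(parts) if parts else "Minor improvements suggested"
-- ===== SOURCE B (Python) =====
-- def _summarize_recommendations(recommendations):
--     """Summarize recommendations into a single message."""
--     if not recommendations:
--         return "No significant issues detected. Extraction quality is good."
--     nh = nm = 0
--     for r in recommendations:
--         s = r["severity"]
--         if s == "high":
--             nh += 1
--         elif s == "medium":
--             nm += 1
--     if nh and nm:
--         return f"{nh} high-priority issues need attention; {nm} medium-priority improvements suggested"
--     if nh:
--         return f"{nh} high-priority issues need attention"
--     if nm:
--         return f"{nm} medium-priority improvements suggested"
--     return "Minor improvements suggested"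
-- ===== Notes on version B (the rewrite author's own statement) =====
-- stated objective: simpler
-- what changed: One pass with two integer counters and direct returns per case, instead of building two filtered lists and joining a parts list.
import Mathlib
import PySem

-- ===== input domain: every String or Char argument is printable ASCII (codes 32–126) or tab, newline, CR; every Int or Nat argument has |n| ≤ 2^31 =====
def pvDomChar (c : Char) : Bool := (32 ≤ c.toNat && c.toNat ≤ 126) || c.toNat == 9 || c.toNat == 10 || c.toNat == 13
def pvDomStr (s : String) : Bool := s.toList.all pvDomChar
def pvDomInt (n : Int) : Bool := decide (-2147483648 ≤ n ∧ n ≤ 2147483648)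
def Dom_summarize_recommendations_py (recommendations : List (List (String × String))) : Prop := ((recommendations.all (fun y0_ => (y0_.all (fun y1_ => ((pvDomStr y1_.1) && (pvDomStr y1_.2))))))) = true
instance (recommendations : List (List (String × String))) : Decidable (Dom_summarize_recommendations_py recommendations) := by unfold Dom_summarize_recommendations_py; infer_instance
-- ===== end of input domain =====

-- B replaces A's two filtering passes and parts-list join by a single counting pass
-- with direct per-case returns (objective: simpler; return value only, no mutation).


-- ===== PORT A =====
-- r["severity"]: first match in the association list; Pre_ guarantees the key is present,
-- so the "" default is never used on admitted inputs.
def pvSev (r : List (String × String)) : String :=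
  (((r.find? (fun p => p.1 == "severity")).map Prod.snd).getD "")

def summarize_recommendations_py (recommendations : List (List (String × String))) : String :=
  let high_priority := recommendations.filter (fun r => pvSev r == "high")
  let medium_priority := recommendations.filter (fun r => pvSev r == "medium")
  if recommendations.isEmpty then
    "No significant issues detected. Extraction quality is good."
  else
    let parts : List String :=
      (if !high_priority.isEmpty then
        [PySem.Int.toStr (high_priority.length : Int) ++ " high-priority issues need attention"] else [])
      ++ (if !medium_priority.isEmpty then
        [PySem.Int.toStr (medium_priority.length : Int) ++ " medium-priority improvements suggested"] else [])
    if !parts.isEmpty then PySem.Str.join "; " parts else "Minor improvements suggested"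

-- ===== PORT B =====
def pvStep (p : Int × Int) (r : List (String × String)) : Int × Int :=
  let s := pvSev r
  if s == "high" then (p.1 + 1, p.2)
  else if s == "medium" then (p.1, p.2 + 1)
  else p

def summarize_recommendations_py_alt (recommendations : List (List (String × String))) : String :=
  if recommendations.isEmpty then
    "No significant issues detected. Extraction quality is good."
  else
    let c := recommendations.foldl pvStep ((0 : Int), (0 : Int))
    let nh := c.1
    let nm := c.2
    if nh != 0 && nm != 0 then
      PySem.Int.toStr nh ++ " high-priority issues need attention; " ++
        PySem.Int.toStr nm ++ " medium-priority improvements suggested"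
    else if nh != 0 then PySem.Int.toStr nh ++ " high-priority issues need attention"
    else if nm != 0 then PySem.Int.toStr nm ++ " medium-priority improvements suggested"
    else "Minor improvements suggested"

-- ===== PRECONDITION & SPEC =====
-- Pre_ excludes non-empty inputs containing a dict without a "severity" key: there the
-- Python A raises KeyError (B raises it too).
def Pre_summarize_recommendations_py (recommendations : List (List (String × String))) : Prop :=
  ∀ r ∈ recommendations, (r.find? (fun p => p.1 == "severity")).isSome

instance (recommendations : List (List (String × String))) : Decidable (Pre_summarize_recommendations_py recommendations) := by unfold Pre_summarize_recommendations_py; infer_instance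

def pvWitness_summarize_recommendations_py : (List (List (String × String))) :=
  [[("severity", "high")], [("severity", "low")]]

def Spec_summarize_recommendations_py (recommendations : List (List (String × String))) (out : String) : Prop := out = summarize_recommendations_py_alt recommendations
instance (recommendations : List (List (String × String))) (out : String) : Decidable (Spec_summarize_recommendations_py recommendations out) := by unfold Spec_summarize_recommendations_py; infer_instance

-- ===== CLAIM (what is proved, stated in full; the proofs are below) =====
def Claim_equal_summarize_recommendations_py : Prop := ∀ (recommendations : List (List (String × String))), Dom_summarize_recommendations_py recommendations → Pre_summarize_recommendations_py recommendations → Spec_summarize_recommendations_py recommendations (summarize_recommendations_py recommendations)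

-- ===== LEMMAS AND PROOFS =====

-- B's fold computes the lengths of A's two filtered lists.
lemma fold_counts (recs : List (List (String × String))) (a b : Int) :
    recs.foldl pvStep (a, b) =
      (a + ((recs.filter (fun r => pvSev r == "high")).length : Int),
       b + ((recs.filter (fun r => pvSev r == "medium")).length : Int)) := by
  induction recs generalizing a b with
  | nil => simp
  | cons r rest ih =>
    simp only [List.foldl_cons, List.filter_cons, pvStep]
    by_cases h1 : pvSev r == "high"
    · have h2 : ¬ (pvSev r == "medium") := by simp_all
      simp [h1, h2, ih, Prod.ext_iff]
      omega
    · by_cases h2 : pvSev r == "medium"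
      · simp [h1, h2, ih, Prod.ext_iff]
        omega
      · simp [h1, h2, ih]

lemma join_two (x y : String) : PySem.Str.join "; " [x, y] = x ++ "; " ++ y := by
  simp [PySem.Str.join, PySem.Chars.join, List.intercalate, List.intersperse, String.ofList_append]
  rw [show (';' :: ' ' :: y.toList) = "; ".toList ++ y.toList from rfl, String.ofList_append]
  simp [String.append_assoc]

lemma join_one (x : String) : PySem.Str.join "; " [x] = x := by
  simp [PySem.Str.join, PySem.Chars.join, List.intercalate]

lemma cast_succ_ne_zero (n : Nat) : ¬((n : Int) + 1 = 0) := by omega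

-- merging the "; " separator into B's one-piece literal
lemma merge_lits (x y : String) :
    (x ++ " high-priority issues need attention") ++ "; " ++
      (y ++ " medium-priority improvements suggested") =
    x ++ " high-priority issues need attention; " ++ y ++
      " medium-priority improvements suggested" := by
  rw [show (" high-priority issues need attention; " : String) =
        " high-priority issues need attention" ++ "; " from rfl]
  simp [String.append_assoc]

-- ===== VERDICT (by name: the statement is the Claim_ definition above) =====
theorem summarize_recommendations_py_spec : Claim_equal_summarize_recommendations_py := by
  intro recs _ _
  unfold Spec_summarize_recommendations_py summarize_recommendations_py summarize_recommendations_py_alt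
  by_cases hE : recs.isEmpty
  · simp [hE]
  · simp only [hE, Bool.false_eq_true, if_false]
    rw [fold_counts]
    generalize recs.filter (fun r => pvSev r == "high") = H
    generalize recs.filter (fun r => pvSev r == "medium") = M
    cases H <;> cases M <;>
      simp [join_one, join_two, merge_lits, cast_succ_ne_zero]
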